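-- pv_equiv track=rewrite | github.com/Dom4489/Instagram-Unfollow-Checker | GetUnfollowers.py | findDoNotFollow
-- ===== SOURCE A (Python) =====
-- def findDoNotFollow(followers, following):
--     followers.sort()
--     following.sort()
--     notFollowing = []
--     for i in range(len(following)):
--         try:
--             followers.index(following[i])
--         except ValueError:
--             notFollowing += [following[i]]
--     return notFollowing
-- ===== SOURCE B (Python) =====
-- def findDoNotFollow(followers, following):
--     followers.sort()
--     following.sort()
--     notFollowing = []
--     j = 0
--     n = len(followers)
--     for x in following:
--         while j < n and followers[j] < x:
--             j += 1
--         if j == n or followers[j] != x: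
--             notFollowing.append(x)
--     return notFollowing
-- ===== Notes on version B (the rewrite author's own statement) =====
-- stated objective: faster
-- what changed: Replaces the per-element linear .index scan over followers with a single merge-style two-pointer pass over the two sorted lists.
import Mathlib
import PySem

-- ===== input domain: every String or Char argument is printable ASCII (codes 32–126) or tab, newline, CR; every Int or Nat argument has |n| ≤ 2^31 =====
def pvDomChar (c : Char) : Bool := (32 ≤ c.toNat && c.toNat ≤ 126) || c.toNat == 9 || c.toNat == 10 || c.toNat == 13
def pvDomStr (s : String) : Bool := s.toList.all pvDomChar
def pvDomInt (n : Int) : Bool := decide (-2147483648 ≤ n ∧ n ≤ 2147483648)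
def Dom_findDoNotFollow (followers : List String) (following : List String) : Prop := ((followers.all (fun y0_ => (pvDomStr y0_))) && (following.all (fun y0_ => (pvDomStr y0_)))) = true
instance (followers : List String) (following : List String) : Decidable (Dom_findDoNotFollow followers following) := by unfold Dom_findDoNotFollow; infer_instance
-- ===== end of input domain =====

-- B replaces A's per-element linear `.index` scan by one merge-style two-pointer pass
-- over the two sorted lists (faster). Both A and B sort BOTH argument lists in place
-- (the equivalence proved here is about the return value; B performs the same mutation).

-- ===== PORT A =====
-- for i in range(len(following)): try followers.index(...) except ValueError: append
def findDoNotFollow (followers : List String) (following : List String) : List String :=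
  let fs := PySem.List.sorted followers (fun x => x)
  let gs := PySem.List.sorted following (fun x => x)
  (PySem.List.pyRange 0 (PySem.List.len gs)).foldl
    (fun acc i =>
      match PySem.List.index? fs (PySem.List.pyGetD gs i "") with
      | some _ => acc
      | none => acc ++ [PySem.List.pyGetD gs i ""]) []

-- ===== PORT B =====
-- the inner `while j < n and followers[j] < x: j += 1`
def pvAdvance (fs : List String) (x : String) (j : Nat) : Nat :=
  if h : j < fs.length then
    if fs[j] < x then pvAdvance fs x (j + 1) else j
  else j
termination_by fs.length - j

-- the `for x in following` loop carrying the pointer j and the result list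
def pvMergeLoop (fs : List String) : List String → Nat → List String → List String
  | [], _, acc => acc
  | x :: rest, j, acc =>
    let j' := pvAdvance fs x j
    if h : j' < fs.length then
      if fs[j'] ≠ x then pvMergeLoop fs rest j' (acc ++ [x])
      else pvMergeLoop fs rest j' acc
    else pvMergeLoop fs rest j' (acc ++ [x])

def findDoNotFollow_alt (followers : List String) (following : List String) : List String :=
  let fs := PySem.List.sorted followers (fun x => x)
  let gs := PySem.List.sorted following (fun x => x)
  pvMergeLoop fs gs 0 []

-- ===== PRECONDITION & SPEC =====
def Spec_findDoNotFollow (followers : List String) (following : List String) (out : List String) : Prop := out = findDoNotFollow_alt followers following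
instance (followers : List String) (following : List String) (out : List String) : Decidable (Spec_findDoNotFollow followers following out) := by unfold Spec_findDoNotFollow; infer_instance

-- ===== CLAIM (what is proved, stated in full; the proofs are below) =====
def Claim_equal_findDoNotFollow : Prop := ∀ (followers : List String) (following : List String), Dom_findDoNotFollow followers following → Spec_findDoNotFollow followers following (findDoNotFollow followers following)

-- ===== LEMMAS AND PROOFS =====

lemma pvAdvance_le (fs : List String) (x : String) (j : Nat) (hj : j ≤ fs.length) :
    pvAdvance fs x j ≤ fs.length := by
  revert hj
  induction j using pvAdvance.induct fs x with
  | case1 j h hlt ih => intro _; rw [pvAdvance]; simp only [dif_pos h, if_pos hlt]; exact ih (by omega)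
  | case2 j h hlt => intro _; rw [pvAdvance]; simp only [dif_pos h, if_neg hlt]; omega
  | case3 j h => intro hj; rw [pvAdvance]; simp only [dif_neg h]; exact hj

lemma pvAdvance_skipped (fs : List String) (x : String) (j : Nat) :
    ∀ k (hk : k < fs.length), j ≤ k → k < pvAdvance fs x j → fs[k] < x := by
  induction j using pvAdvance.induct fs x with
  | case1 j h hlt ih =>
    intro k hk hjk hka
    rw [pvAdvance] at hka; simp only [dif_pos h, if_pos hlt] at hka
    rcases Nat.eq_or_lt_of_le hjk with rfl | hjk'
    · exact hlt
    · exact ih k hk hjk' hka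
  | case2 j h hlt =>
    intro k hk hjk hka
    rw [pvAdvance] at hka; simp only [dif_pos h, if_neg hlt] at hka; omega
  | case3 j h =>
    intro k hk hjk hka
    rw [pvAdvance] at hka; simp only [dif_neg h] at hka; omega

lemma pvAdvance_stop (fs : List String) (x : String) (j : Nat) :
    ∀ h : pvAdvance fs x j < fs.length, ¬ fs[pvAdvance fs x j] < x := by
  induction j using pvAdvance.induct fs x with
  | case1 j h1 hlt ih =>
    rw [pvAdvance]
    simp only [dif_pos h1, if_pos hlt]
    exact ih
  | case2 j h1 hlt =>
    rw [pvAdvance]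
    simp only [dif_pos h1, if_neg hlt]
    intro _; exact hlt
  | case3 j h1 =>
    rw [pvAdvance]
    simp only [dif_neg h1]
    intro h2; omega

-- on a ≤-sorted list, after advancing past everything < x, x is present iff it sits at the pointer
lemma pvMem_iff_at (fs : List String) (x : String) (j' : Nat)
    (hfs : fs.Pairwise (· ≤ ·))
    (hlt : ∀ k (hk : k < fs.length), k < j' → fs[k] < x)
    (hstop : ∀ h : j' < fs.length, ¬ fs[j'] < x) :
    x ∈ fs ↔ ∃ h : j' < fs.length, fs[j'] = x := by
  constructor
  · intro hx
    obtain ⟨k, hk, hkx⟩ := List.mem_iff_getElem.mp hx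
    have hjk : j' ≤ k := by
      by_contra hc
      exact absurd (hkx ▸ hlt k hk (by omega)) (lt_irrefl x)
    have hj' : j' < fs.length := lt_of_le_of_lt hjk hk
    refine ⟨hj', ?_⟩
    have h1 : fs[j'] ≤ x := by
      rcases Nat.eq_or_lt_of_le hjk with rfl | hjk'
      · exact le_of_eq hkx
      · exact hkx ▸ (List.pairwise_iff_getElem.mp hfs) j' k hj' hk hjk'
    have h2 : x ≤ fs[j'] := le_of_not_gt (hstop hj')
    exact le_antisymm h1 h2
  · rintro ⟨h, rfl⟩
    exact List.getElem_mem h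

-- the merge loop computes exactly the "not a member of fs" filter, for sorted inputs
lemma pvMergeLoop_eq (fs : List String) (hfs : fs.Pairwise (· ≤ ·)) :
    ∀ (gs : List String), gs.Pairwise (· ≤ ·) →
    ∀ (j : Nat) (acc : List String), j ≤ fs.length →
    (∀ k (hk : k < fs.length), k < j → ∀ y ∈ gs, fs[k] < y) →
    pvMergeLoop fs gs j acc = acc ++ gs.filter (fun x => (PySem.List.index? fs x).isNone) := by
  intro gs
  induction gs with
  | nil => intro _ j acc _ _; simp [pvMergeLoop]
  | cons x rest ih =>
    intro hg j acc hj hinv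
    have hgx : ∀ y ∈ rest, x ≤ y := (List.pairwise_cons.mp hg).1
    have hgr : rest.Pairwise (· ≤ ·) := (List.pairwise_cons.mp hg).2
    rw [pvMergeLoop]
    set j' := pvAdvance fs x j with hj'def
    have hj'le : j' ≤ fs.length := pvAdvance_le fs x j hj
    have hltx : ∀ k (hk : k < fs.length), k < j' → fs[k] < x := by
      intro k hk hkj'
      by_cases hkj : k < j
      · exact hinv k hk hkj x (List.mem_cons_self)
      · exact pvAdvance_skipped fs x j k hk (by omega) hkj'
    have hmem : x ∈ fs ↔ ∃ h : j' < fs.length, fs[j'] = x :=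
      pvMem_iff_at fs x j' hfs hltx (pvAdvance_stop fs x j)
    have hinv' : ∀ k (hk : k < fs.length), k < j' → ∀ y ∈ rest, fs[k] < y := by
      intro k hk hkj' y hy
      exact lt_of_lt_of_le (hltx k hk hkj') (hgx y hy)
    rw [List.filter_cons]
    by_cases h : j' < fs.length
    · rw [dif_pos h]
      by_cases hx : fs[j'] = x
      · -- x ∈ fs: loop skips it; the filter drops it
        have hxmem : x ∈ fs := hmem.mpr ⟨h, hx⟩
        have hnone : ((PySem.List.index? fs x).isNone : Bool) = false := by
          rw [Option.isNone_eq_false_iff, Option.isSome_iff_ne_none, ne_eq,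
              PySem.List.index?_eq_none_iff]
          simp [hxmem]
        rw [if_neg (by simp [hx]), ih hgr j' acc hj'le hinv']
        simp only [hnone, Bool.false_eq_true, if_false]
      · have hxmem : x ∉ fs := fun hc => hx (hmem.mp hc).2
        have hnone : ((PySem.List.index? fs x).isNone : Bool) = true := by
          rw [Option.isNone_iff_eq_none, PySem.List.index?_eq_none_iff]; exact hxmem
        rw [if_pos hx, ih hgr j' (acc ++ [x]) hj'le hinv']
        simp only [hnone, if_pos, List.append_assoc, List.singleton_append]
    · rw [dif_neg h]
      have hxmem : x ∉ fs := fun hc => h (hmem.mp hc).1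
      have hnone : ((PySem.List.index? fs x).isNone : Bool) = true := by
        rw [Option.isNone_iff_eq_none, PySem.List.index?_eq_none_iff]; exact hxmem
      rw [ih hgr j' (acc ++ [x]) hj'le hinv']
      simp only [hnone, if_pos, List.append_assoc, List.singleton_append]

-- A's indexed loop is the same filter
lemma pvA_eq_filter (fs gs : List String) :
    (PySem.List.pyRange 0 (PySem.List.len gs)).foldl
      (fun acc i =>
        match PySem.List.index? fs (PySem.List.pyGetD gs i "") with
        | some _ => acc
        | none => acc ++ [PySem.List.pyGetD gs i ""]) [] =
    gs.filter (fun x => (PySem.List.index? fs x).isNone) := by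
  have hfun : (fun (acc : List String) (x : String) =>
      match PySem.List.index? fs x with
      | some _ => acc
      | none => acc ++ [x]) =
      (fun acc x => if (PySem.List.index? fs x).isNone then acc ++ [x] else acc) := by
    funext acc x
    cases PySem.List.index? fs x <;> simp
  calc (PySem.List.pyRange 0 (PySem.List.len gs)).foldl
        (fun acc i =>
          match PySem.List.index? fs (PySem.List.pyGetD gs i "") with
          | some _ => acc
          | none => acc ++ [PySem.List.pyGetD gs i ""]) []
      = gs.foldl (fun acc x =>
          match PySem.List.index? fs x with
          | some _ => acc
          | none => acc ++ [x]) [] :=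
        PySem.List.foldl_pyRange_zero_pyGetD gs ""
          (fun acc x => match PySem.List.index? fs x with
            | some _ => acc
            | none => acc ++ [x]) []
    _ = gs.foldl (fun acc x => if (PySem.List.index? fs x).isNone then acc ++ [x] else acc) [] := by
        rw [hfun]
    _ = gs.filter (fun x => (PySem.List.index? fs x).isNone) := by
        have := PySem.List.foldl_append_if
          (fun x => (PySem.List.index? fs x).isNone) (fun x : String => x) gs []
        simpa using this

-- ===== VERDICT (by name: the statement is the Claim_ definition above) =====
theorem findDoNotFollow_spec : Claim_equal_findDoNotFollow := by
  intro followers following _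
  unfold Spec_findDoNotFollow findDoNotFollow findDoNotFollow_alt
  set fs := PySem.List.sorted followers (fun x => x) with hfs
  set gs := PySem.List.sorted following (fun x => x) with hgs
  have hfsp : fs.Pairwise (· ≤ ·) := PySem.List.sorted_pairwise followers (fun x => x)
  have hgsp : gs.Pairwise (· ≤ ·) := PySem.List.sorted_pairwise following (fun x => x)
  rw [pvA_eq_filter fs gs,
      pvMergeLoop_eq fs hfsp gs hgsp 0 [] (Nat.zero_le _) (by intro k hk h; omega)]
  simp
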